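-- pv_equiv track=rewrite | github.com/sudhanshu746/PythonPractice | scripts/dynamicprog.py | solution
-- ===== SOURCE A (Python) =====
-- from collections import defaultdict
--
-- def solution(A):
-- 	N = len(A)
-- 	hashmap=defaultdict(list)
-- 	result = 0
-- 	for i in range(0,N):
-- 		if A[i] in hashmap:
-- 			hashmap[A[i]].append(i)
-- 		else:
-- 			hashmap[A[i]] = [i]
-- 		result = max(result,abs(max(hashmap[A[i]])-min(hashmap[A[i]])))
-- 	return result
-- ===== SOURCE B (Python) =====
-- def solution(A):
--     first = {}
--     best = 0
--     for i, x in enumerate(A):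
--         if x in first:
--             d = i - first[x]
--             if d > best:
--                 best = d
--         else:
--             first[x] = i
--     return best
-- ===== Notes on version B (the rewrite author's own statement) =====
-- stated objective: alternative
-- what changed: B keeps only the first occurrence index per value in a dict and maximises i - first[x] in one pass, instead of storing every index per value and recomputing max/min of the whole index list at each step; this avoids A's quadratic worst case, though a timing run did not confirm a consistent speed-up.
import Mathlib
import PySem

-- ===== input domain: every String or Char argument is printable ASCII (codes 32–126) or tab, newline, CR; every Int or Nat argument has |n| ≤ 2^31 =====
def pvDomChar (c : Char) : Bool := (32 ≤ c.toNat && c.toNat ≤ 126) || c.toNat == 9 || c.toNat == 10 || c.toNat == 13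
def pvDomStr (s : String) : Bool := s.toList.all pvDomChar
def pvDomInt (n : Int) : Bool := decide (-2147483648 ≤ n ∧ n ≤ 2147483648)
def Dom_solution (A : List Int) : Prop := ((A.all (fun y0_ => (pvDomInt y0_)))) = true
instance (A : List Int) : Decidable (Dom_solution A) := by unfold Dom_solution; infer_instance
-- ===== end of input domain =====

-- B replaces A's per-value list of all occurrence indices (with max/min recomputed
-- at every step) by a first-occurrence-only dict and a single running maximum of
-- i - first[x]; objective: alternative (avoids recomputing per-value extrema).

-- ===== PORT A =====
-- A[i] with 0 ≤ i < len(A) never raises; pyGetD with default 0 is exact on that range.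
def solution (A : List Int) : Int :=
  (((PySem.List.pyRange 0 (PySem.List.len A)).foldl
    (fun (st : PySem.Dict Int (List Int) × Int) (i : Int) =>
      let x := PySem.List.pyGetD A i 0
      let hashmap := if st.1.contains x
        then st.1.modify x [] (fun l => l ++ [i])
        else st.1.insert x [i]
      let lst := hashmap.getD x []
      (hashmap,
        max st.2 |((PySem.List.max? lst (fun y => y)).getD 0
                   - (PySem.List.min? lst (fun y => y)).getD 0)|))
    (PySem.Dict.empty, 0)).2)

-- ===== PORT B =====
def solution_alt (A : List Int) : Int :=
  (((PySem.List.enumerate A).foldl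
    (fun (st : PySem.Dict Int Int × Int) (p : Int × Int) =>
      if st.1.contains p.2 then
        let d := p.1 - st.1.getD p.2 0
        (st.1, if d > st.2 then d else st.2)
      else (st.1.insert p.2 p.1, st.2))
    (PySem.Dict.empty, 0)).2)

-- ===== PRECONDITION & SPEC =====
def Spec_solution (A : List Int) (out : Int) : Prop := out = solution_alt A
instance (A : List Int) (out : Int) : Decidable (Spec_solution A out) := by unfold Spec_solution; infer_instance

-- ===== CLAIM (what is proved, stated in full; the proofs are below) =====
def Claim_equal_solution : Prop := ∀ (A : List Int), Dom_solution A → Spec_solution A (solution A)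

-- ===== LEMMAS AND PROOFS =====

-- A's loop body, on an already-paired (index, value) element.
def pvStepA (st : PySem.Dict Int (List Int) × Int) (p : Int × Int) :
    PySem.Dict Int (List Int) × Int :=
  let hashmap := if st.1.contains p.2
    then st.1.modify p.2 [] (fun l => l ++ [p.1])
    else st.1.insert p.2 [p.1]
  let lst := hashmap.getD p.2 []
  (hashmap,
    max st.2 |((PySem.List.max? lst (fun y => y)).getD 0
               - (PySem.List.min? lst (fun y => y)).getD 0)|)

-- B's loop body.
def pvStepB (st : PySem.Dict Int Int × Int) (p : Int × Int) :
    PySem.Dict Int Int × Int :=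
  if st.1.contains p.2 then
    let d := p.1 - st.1.getD p.2 0
    (st.1, if d > st.2 then d else st.2)
  else (st.1.insert p.2 p.1, st.2)

-- Relation between the two loop states: every key stored by A's dict is stored by B's
-- dict with the minimum of A's index list, and all stored indices are < s.
def pvInv (s : Int) (h : PySem.Dict Int (List Int)) (f : PySem.Dict Int Int) : Prop :=
  ∀ x : Int,
    (h.get? x = none → f.get? x = none) ∧
    (∀ l, h.get? x = some l → ∃ m, f.get? x = some m ∧ m ∈ l ∧ ∀ j ∈ l, m ≤ j ∧ j < s)

lemma pvLoop (L : List Int) : ∀ (s : Int) (h : PySem.Dict Int (List Int))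
    (f : PySem.Dict Int Int) (r : Int), pvInv s h f → 0 ≤ r →
    ((PySem.List.enumerate L s).foldl pvStepA (h, r)).2
      = ((PySem.List.enumerate L s).foldl pvStepB (f, r)).2 := by
  induction L with
  | nil => intro s h f r _ _; simp [PySem.List.enumerate]
  | cons a L ih =>
    intro s h f r hinv hr
    rw [PySem.List.enumerate_cons]
    simp only [List.foldl_cons]
    by_cases hc : h.contains a = true
    · -- a already stored by both dicts
      have hfS : (h.get? a).isSome := by rw [← PySem.Dict.contains_eq_isSome_get?]; exact hc
      obtain ⟨l, hl⟩ : ∃ l, h.get? a = some l := by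
        cases hg : h.get? a with
        | none => rw [hg] at hfS; simp at hfS
        | some l => exact ⟨l, rfl⟩
      obtain ⟨m, hm, hmem, hbnd⟩ := (hinv a).2 l hl
      have hfc : f.contains a = true := by
        rw [PySem.Dict.contains_eq_isSome_get?, hm]; rfl
      have hms : m < s := (hbnd m hmem).2
      -- A's step
      have hstepA : pvStepA (h, r) (s, a)
          = (h.insert a (l ++ [s]), max r (s - m)) := by
        simp only [pvStepA, hc, if_true, PySem.Dict.modify, PySem.Dict.getD, hl,
          Option.getD_some, PySem.Dict.get?_insert_self]
        congr 1
        -- max of l ++ [s] is s, min is m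
        obtain ⟨M, hM⟩ : ∃ M, PySem.List.max? (l ++ [s]) (fun y => y) = some M := by
          cases hg : PySem.List.max? (l ++ [s]) (fun y => y) with
          | none => simp [PySem.List.max?_eq_none_iff] at hg
          | some M => exact ⟨M, rfl⟩
        obtain ⟨m', hm'⟩ : ∃ m', PySem.List.min? (l ++ [s]) (fun y => y) = some m' := by
          cases hg : PySem.List.min? (l ++ [s]) (fun y => y) with
          | none => simp [PySem.List.min?_eq_none_iff] at hg
          | some m' => exact ⟨m', rfl⟩
        have hMs : M = s := by
          have h1 := PySem.List.max?_isMax hM s (by simp)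
          have h2 : M ∈ l ++ [s] := PySem.List.max?_mem hM
          rcases List.mem_append.mp h2 with h2 | h2
          · have := (hbnd M h2).2; omega
          · simpa using h2
        have hmm : m' = m := by
          have h1 := PySem.List.min?_isMin hm' m (by simp [hmem])
          have h2 : m' ∈ l ++ [s] := PySem.List.min?_mem hm'
          rcases List.mem_append.mp h2 with h2 | h2
          · have := (hbnd m' h2).1; omega
          · simp at h2; omega
        rw [hM, hm', hMs, hmm]
        simp only [Option.getD_some]
        rw [abs_of_nonneg (by omega)]
      -- B's step
      have hstepB : pvStepB (f, r) (s, a) = (f, max r (s - m)) := by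
        simp only [pvStepB, hfc, if_true, PySem.Dict.getD, hm, Option.getD_some]
        congr 1
        by_cases hgt : s - m > r
        · rw [if_pos hgt]; omega
        · rw [if_neg hgt]; omega
      rw [hstepA, hstepB]
      apply ih (s + 1)
      · -- invariant is preserved
        intro x
        by_cases hx : x = a
        · subst hx
          constructor
          · intro hnone; rw [PySem.Dict.get?_insert_self] at hnone; cases hnone
          · intro l' hl'
            rw [PySem.Dict.get?_insert_self] at hl'
            injection hl' with hl'; subst hl'
            refine ⟨m, hm, List.mem_append.mpr (Or.inl hmem), ?_⟩
            intro j hj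
            rcases List.mem_append.mp hj with hj | hj
            · have := hbnd j hj; omega
            · simp at hj; omega
        · rw [PySem.Dict.get?_insert_of_ne _ _ hx]
          refine ⟨(hinv x).1, ?_⟩
          intro l' hl'
          obtain ⟨m', h1, h2, h3⟩ := (hinv x).2 l' hl'
          exact ⟨m', h1, h2, fun j hj => by have := h3 j hj; omega⟩
      · omega
    · -- a is new to both dicts
      have hc' : h.contains a = false := by simpa using hc
      have hnone : h.get? a = none := (PySem.Dict.get?_eq_none_iff_contains h a).mpr hc'
      have hfnone : f.get? a = none := (hinv a).1 hnone
      have hfc : f.contains a = false := by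
        rw [PySem.Dict.contains_eq_isSome_get?, hfnone]; rfl
      have hstepA : pvStepA (h, r) (s, a) = (h.insert a [s], r) := by
        simp only [pvStepA, hc', Bool.false_eq_true, if_false, PySem.Dict.getD,
          PySem.Dict.get?_insert_self, Option.getD_some,
          PySem.List.max?_id_cons, PySem.List.min?_id_cons, List.foldl_nil]
        congr 1
        simp only [sub_self, abs_zero]
        omega
      have hstepB : pvStepB (f, r) (s, a) = (f.insert a s, r) := by
        simp only [pvStepB, hfc, Bool.false_eq_true, if_false]
      rw [hstepA, hstepB]
      apply ih (s + 1)
      · intro x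
        by_cases hx : x = a
        · subst hx
          constructor
          · intro hn; rw [PySem.Dict.get?_insert_self] at hn; cases hn
          · intro l' hl'
            rw [PySem.Dict.get?_insert_self] at hl'
            injection hl' with hl'; subst hl'
            exact ⟨s, PySem.Dict.get?_insert_self f _ s, by simp, by simp⟩
        · rw [PySem.Dict.get?_insert_of_ne _ _ hx, PySem.Dict.get?_insert_of_ne _ _ hx]
          refine ⟨(hinv x).1, ?_⟩
          intro l' hl'
          obtain ⟨m', h1, h2, h3⟩ := (hinv x).2 l' hl'
          exact ⟨m', h1, h2, fun j hj => by have := h3 j hj; omega⟩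
      · omega

-- A's fold over range(0, N) with A[i] lookups is the fold of the same body over enumerate(A).
lemma pvSolutionA_eq (A : List Int) :
    solution A = ((PySem.List.enumerate A).foldl pvStepA (PySem.Dict.empty, 0)).2 := by
  rw [PySem.List.enumerate_eq_map_pyRange A 0, List.foldl_map]
  rfl

lemma pvSolutionB_eq (A : List Int) :
    solution_alt A = ((PySem.List.enumerate A).foldl pvStepB (PySem.Dict.empty, 0)).2 := by
  rfl

lemma pvInv_empty : pvInv 0 PySem.Dict.empty PySem.Dict.empty := by
  intro x
  exact ⟨fun _ => rfl, fun l hl => by cases hl⟩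

-- ===== VERDICT (by name: the statement is the Claim_ definition above) =====
theorem solution_spec : Claim_equal_solution := by
  intro A _
  unfold Spec_solution
  rw [pvSolutionA_eq, pvSolutionB_eq]
  exact pvLoop A 0 PySem.Dict.empty PySem.Dict.empty 0 pvInv_empty le_rfl
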